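-- pv_equiv track=rewrite | github.com/baliame/awsc | src/awsc/termui/common.py | column_sizer
-- ===== SOURCE A (Python) =====
-- def column_sizer(y0, y1, labels, data):
--     """
--     Determines column widths.
--
--     Parameters
--     ----------
--     y0 : int
--         Starting y.
--     y1 : int
--         Ending y.
--     labels : list
--         A list of labels.
--     data : dict, optional
--         A mapping of labels to values.
--
--     Returns
--     -------
--     list(int)
--         A list of widths for each column.
--     """
--     longest = []
--     length = 0
--     y = y0
--     for name in labels:
--         if data is not None and name not in data:
--             continue
--         display = name + ": "
--         if len(display) > length:
--             length = len(display)
--         y += 1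
--         if y > y1:
--             y = y0
--             longest.append(length)
--             length = 0
--     if length > 0:
--         longest.append(length)
--     return longest
-- ===== SOURCE B (Python) =====
-- def column_sizer(y0, y1, labels, data):
--     filtered = [name for name in labels if data is None or name in data]
--     chunk = max(1, y1 - y0 + 1)
--     widths = []
--     i = 0
--     while i < len(filtered):
--         widths.append(max(len(name) + 2 for name in filtered[i:i + chunk]))
--         i += chunk
--     return widths
-- ===== Notes on version B (the rewrite author's own statement) =====
-- stated objective: simpler
-- what changed: Replaces A's stateful single pass with three running accumulators (running max, y-counter with flush, output list) by a filter of the labels followed by slicing into fixed-size chunks of max(1, y1-y0+1) and taking max(len+2) over each chunk.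
import Mathlib
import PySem

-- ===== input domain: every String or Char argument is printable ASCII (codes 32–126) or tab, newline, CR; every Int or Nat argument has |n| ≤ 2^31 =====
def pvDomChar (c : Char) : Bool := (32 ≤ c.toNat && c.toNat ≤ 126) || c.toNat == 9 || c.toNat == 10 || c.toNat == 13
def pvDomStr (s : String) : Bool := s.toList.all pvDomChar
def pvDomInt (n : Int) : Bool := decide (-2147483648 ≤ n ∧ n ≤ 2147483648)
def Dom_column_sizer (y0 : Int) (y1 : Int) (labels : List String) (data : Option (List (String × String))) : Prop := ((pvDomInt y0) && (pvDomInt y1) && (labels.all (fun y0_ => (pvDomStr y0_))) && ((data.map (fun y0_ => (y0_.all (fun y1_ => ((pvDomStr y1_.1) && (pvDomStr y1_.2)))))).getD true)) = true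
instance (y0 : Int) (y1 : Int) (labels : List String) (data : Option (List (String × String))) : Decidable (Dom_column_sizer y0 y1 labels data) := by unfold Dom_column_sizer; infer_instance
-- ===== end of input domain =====

-- B replaces A's stateful running-max/flush pass by filter-then-chunk-and-reduce; same O(n) cost, simpler decomposition.


-- ===== PORT A =====
-- literal transliteration of A: one fold over labels carrying (longest, length, y)
def column_sizer (y0 : Int) (y1 : Int) (labels : List String) (data : Option (List (String × String))) : List Int :=
  let st := labels.foldl
    (fun (st : List Int × Int × Int) name =>
      let skip : Bool := match data with
        | some d => !((PySem.Dict.mk d).contains name)   -- 'data is not None and name not in data'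
        | none => false
      if skip then st
      else
        let display := name ++ ": "
        let length := if PySem.Str.len display > st.2.1 then PySem.Str.len display else st.2.1
        let y := st.2.2 + 1
        if y > y1 then (st.1 ++ [length], (0 : Int), y0)
        else (st.1, length, y))
    (([] : List Int), (0 : Int), y0)
  if st.2.1 > 0 then st.1 ++ [st.2.1] else st.1

-- ===== PORT B =====
-- port of Source B's while loop: every call has c ≥ 1 (c = max 1 (y1-y0+1)), where 'i + 1 + (c - 1)' IS
-- Python's 'i += chunk'; the '+ 1 +' phrasing only makes the recursion terminating for every c : Nat.
-- The '.getD 0' default of Python's 'max(...)' is unreachable since each slice taken is nonempty.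
def chunkLoop (c : Nat) (l : List String) (i : Nat) (out : List Int) : List Int :=
  if i < l.length then
    chunkLoop c l (i + 1 + (c - 1))
      (out ++ [(PySem.List.max?
        ((PySem.List.slice l (some (i : Int)) (some ((i : Int) + (c : Int)))).map
          (fun n => PySem.Str.len n + 2)) (fun y => y)).getD 0])
  else out
termination_by l.length - i
decreasing_by omega

def column_sizer_alt (y0 : Int) (y1 : Int) (labels : List String) (data : Option (List (String × String))) : List Int :=
  let filtered := labels.filter (fun name => match data with
    | some d => (PySem.Dict.mk d).contains name
    | none => true)
  let chunk : Int := max 1 (y1 - y0 + 1)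
  chunkLoop chunk.toNat filtered 0 []

-- ===== PRECONDITION & SPEC =====
def Spec_column_sizer (y0 : Int) (y1 : Int) (labels : List String) (data : Option (List (String × String))) (out : List Int) : Prop := out = column_sizer_alt y0 y1 labels data
instance (y0 : Int) (y1 : Int) (labels : List String) (data : Option (List (String × String))) (out : List Int) : Decidable (Spec_column_sizer y0 y1 labels data out) := by unfold Spec_column_sizer; infer_instance

-- ===== CLAIM (what is proved, stated in full; the proofs are below) =====
def Claim_equal_column_sizer : Prop := ∀ (y0 : Int) (y1 : Int) (labels : List String) (data : Option (List (String × String))), Dom_column_sizer y0 y1 labels data → Spec_column_sizer y0 y1 labels data (column_sizer y0 y1 labels data)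

-- ===== LEMMAS AND PROOFS =====

-- proof-side structural view of B's loop: one output element per chunk of c labels
def chunkMaxes (c : Nat) : List String → List Int
  | [] => []
  | x :: xs =>
    ((PySem.List.max? (((x :: xs).take c).map (fun n => PySem.Str.len n + 2)) (fun y => y)).getD 0)
      :: chunkMaxes c (xs.drop (c - 1))
termination_by l => l.length
decreasing_by simp_wf

-- proof-side reformulation of A's loop on the filtered list: state (len, y), flush emits
def wrapW (y0 y1 : Int) : Int → Int → List String → List Int
  | len, _, [] => if len > 0 then [len] else []
  | len, y, n :: l =>
      let L := max len (PySem.Str.len n + 2)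
      if y + 1 > y1 then L :: wrapW y0 y1 0 y0 l else wrapW y0 y1 L (y + 1) l

theorem str_len_nonneg (s : String) : 0 ≤ PySem.Str.len s := by
  simp [PySem.Str.len_eq]

theorem len_display (n : String) : PySem.Str.len (n ++ ": ") = PySem.Str.len n + 2 := by
  rw [PySem.Str.len_append]
  have h2 : PySem.Str.len ": " = 2 := by decide
  omega

-- the zeta-expanded body of A's loop (equal by definitional unfolding to the lambda in column_sizer)
def stepA (y0 y1 : Int) (st : List Int × Int × Int) (name : String) : List Int × Int × Int :=
  if st.2.2 + 1 > y1 then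
    (st.1 ++ [if PySem.Str.len (name ++ ": ") > st.2.1 then PySem.Str.len (name ++ ": ") else st.2.1], (0 : Int), y0)
  else
    (st.1, if PySem.Str.len (name ++ ": ") > st.2.1 then PySem.Str.len (name ++ ": ") else st.2.1, st.2.2 + 1)

def finishA (st : List Int × Int × Int) : List Int :=
  if st.2.1 > 0 then st.1 ++ [st.2.1] else st.1

-- A's fold (guard already removed) computes wrapW
theorem loopA_eq_wrap (y0 y1 : Int) (l : List String) : ∀ (acc : List Int) (len y : Int),
    finishA (l.foldl (stepA y0 y1) (acc, len, y)) = acc ++ wrapW y0 y1 len y l := by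
  induction l with
  | nil => intro acc len y; by_cases h : len > 0 <;> simp [finishA, wrapW, h]
  | cons n l ih =>
    intro acc len y
    have hL : (if PySem.Str.len (n ++ ": ") > len then PySem.Str.len (n ++ ": ") else len)
        = max len (PySem.Str.len n + 2) := by
      rw [len_display]; omega
    simp only [List.foldl_cons, stepA, hL, wrapW]
    by_cases hf : y + 1 > y1
    · rw [if_pos hf, if_pos hf, ih]
      simp
    · rw [if_neg hf, if_neg hf, ih]

-- wrapW from a fresh state computes the chunked maxima, provided c = max 1 (y1-y0+1)
theorem wrap_eq_chunk (y0 y1 : Int) (c : Nat) (hc : (c : Int) = max 1 (y1 - y0 + 1)) :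
    ∀ l : List String,
      (wrapW y0 y1 0 y0 l = chunkMaxes c l) ∧
      (∀ (k : Nat) (len : Int), 1 ≤ k → k < c → 0 < len →
        wrapW y0 y1 len (y0 + k) l =
          ((l.take (c - k)).foldl (fun a n => max a (PySem.Str.len n + 2)) len)
            :: chunkMaxes c (l.drop (c - k))) := by
  intro l
  induction l with
  | nil =>
    constructor
    · simp [wrapW, chunkMaxes]
    · intro k len _ _ hlen
      simp [wrapW, chunkMaxes, hlen]
  | cons n l ih =>
    have hd : (0:Int) ≤ PySem.Str.len n := str_len_nonneg n
    constructor
    · -- start of a chunk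
      have hL : max (0:Int) (PySem.Str.len n + 2) = PySem.Str.len n + 2 := by omega
      simp only [wrapW, hL]
      by_cases hf : y0 + 1 > y1
      · -- c = 1 : flush every element
        have hc1 : c = 1 := by omega
        subst hc1
        simp only [if_pos hf]
        rw [ih.1]
        simp [chunkMaxes, PySem.List.max?_id_cons]
      · -- c ≥ 2 : continue within the first chunk
        have hc2 : 2 ≤ c := by omega
        simp only [if_neg hf]
        have h1 : (y0:Int) + 1 = y0 + (1:Nat) := by push_cast; ring
        rw [h1, ih.2 1 (PySem.Str.len n + 2) le_rfl (by omega) (by omega)]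
        obtain ⟨m, rfl⟩ : ∃ m, c = m + 1 := ⟨c - 1, by omega⟩
        simp [chunkMaxes, List.take_succ_cons, PySem.List.max?_id_cons]
        rw [← List.map_take, List.foldl_map]
    · -- inside a chunk
      intro k len hk1 hkc hlen
      have hLpos : (0:Int) < max len (PySem.Str.len n + 2) := by omega
      simp only [wrapW]
      by_cases hf : y0 + (k:Int) + 1 > y1
      · -- flush: this element completes the chunk, so c = k + 1
        have hck : c = k + 1 := by omega
        simp only [if_pos hf]
        rw [ih.1]
        have h1 : c - k = 1 := by omega
        simp [hck]
      · -- keep going: k + 1 < c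
        have hkc' : k + 1 < c := by omega
        simp only [if_neg hf]
        have h1 : (y0:Int) + (k:Int) + 1 = y0 + ((k+1 : Nat) : Int) := by push_cast; ring
        rw [h1, ih.2 (k+1) (max len (PySem.Str.len n + 2)) (by omega) hkc' hLpos]
        have h2 : c - k = (c - (k+1)) + 1 := by omega
        simp [h2, List.take_succ_cons]

-- B's index loop started at offset k + i over l is the loop started at i over l.drop k
theorem chunkLoop_shift (c : Nat) (l : List String) (k : Nat) :
    ∀ i (out : List Int), chunkLoop c l (k + i) out = chunkLoop c (l.drop k) i out := by
  suffices H : ∀ n i (out : List Int), l.length - i ≤ n →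
      chunkLoop c l (k + i) out = chunkLoop c (l.drop k) i out by
    exact fun i out => H (l.length - i) i out le_rfl
  intro n
  induction n with
  | zero =>
    intro i out h
    conv_lhs => rw [chunkLoop]
    conv_rhs => rw [chunkLoop]
    rw [if_neg (by omega), if_neg (by simp [List.length_drop]; omega)]
  | succ n ih =>
    intro i out h
    by_cases hi : i < (l.drop k).length
    · have hi' : k + i < l.length := by simp [List.length_drop] at hi; omega
      conv_lhs => rw [chunkLoop]
      conv_rhs => rw [chunkLoop]
      rw [if_pos hi', if_pos hi]
      have hsl : PySem.List.slice l (some ((k + i : Nat) : Int)) (some (((k + i : Nat) : Int) + (c : Int)))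
          = PySem.List.slice (l.drop k) (some (i : Int)) (some ((i : Int) + (c : Int))) := by
        have e1 : ((k + i : Nat) : Int) + (c : Int) = ((k + i + c : Nat) : Int) := by push_cast; ring
        have e2 : ((i : Nat) : Int) + (c : Int) = ((i + c : Nat) : Int) := by push_cast; ring
        rw [e1, e2, PySem.List.slice_natCast, PySem.List.slice_natCast, List.drop_drop]
        congr 1
        omega
      rw [hsl]
      have := ih (i + 1 + (c - 1)) (out ++ [(PySem.List.max?
        ((PySem.List.slice (l.drop k) (some (i : Int)) (some ((i : Int) + (c : Int)))).map
          (fun n => PySem.Str.len n + 2)) (fun y => y)).getD 0]) (by omega)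
      rw [show k + i + 1 + (c - 1) = k + (i + 1 + (c - 1)) by omega, this]
    · have hi' : ¬ (k + i < l.length) := by simp [List.length_drop] at hi ⊢; omega
      conv_lhs => rw [chunkLoop]
      conv_rhs => rw [chunkLoop]
      rw [if_neg hi', if_neg hi]

-- B's while loop computes the chunked maxima
theorem chunkLoop_eq_chunkMaxes (c : Nat) (hc : 1 ≤ c) :
    ∀ (l : List String) (out : List Int), chunkLoop c l 0 out = out ++ chunkMaxes c l := by
  suffices H : ∀ n (l : List String) (out : List Int), l.length ≤ n →
      chunkLoop c l 0 out = out ++ chunkMaxes c l by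
    exact fun l out => H l.length l out le_rfl
  intro n
  induction n with
  | zero =>
    intro l out h
    have : l = [] := List.length_eq_zero_iff.mp (by omega)
    subst this
    rw [chunkLoop]
    simp [chunkMaxes]
  | succ n ih =>
    intro l out h
    match l with
    | [] => conv_lhs => rw [chunkLoop]
            simp [chunkMaxes]
    | x :: xs =>
      conv_lhs => rw [chunkLoop]
      rw [if_pos (by simp)]
      have e0 : PySem.List.slice (x :: xs) (some ((0 : Nat) : Int)) (some (((0 : Nat) : Int) + (c : Int)))
          = (x :: xs).take c := by
        rw [show ((0 : Nat) : Int) + (c : Int) = ((0 + c : Nat) : Int) by push_cast; ring,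
          PySem.List.slice_natCast]
        simp
      have e1 : (0 : Nat) + 1 + (c - 1) = c + 0 := by omega
      rw [show ((0 : Nat) : Int) = (((0 : Nat) : Nat) : Int) from rfl] at e0
      rw [e0, e1, chunkLoop_shift c (x :: xs) c 0]
      have hdrop : (x :: xs).drop c = xs.drop (c - 1) := by
        rw [show c = (c - 1) + 1 by omega]
        simp
      rw [hdrop, ih (xs.drop (c - 1)) _ (by simp only [List.length_drop, List.length_cons] at h ⊢; omega)]
      rw [chunkMaxes]
      simp

-- ===== VERDICT (by name: the statement is the Claim_ definition above) =====
theorem column_sizer_spec : Claim_equal_column_sizer := by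
  intro y0 y1 labels data _
  unfold Spec_column_sizer
  have hc : (((max 1 (y1 - y0 + 1)).toNat : Int)) = max 1 (y1 - y0 + 1) := by omega
  have hc1 : 1 ≤ (max 1 (y1 - y0 + 1)).toNat := by omega
  cases data with
  | none =>
    have e1 : column_sizer y0 y1 labels none
        = finishA (labels.foldl (stepA y0 y1) ([], 0, y0)) := rfl
    have e2 : column_sizer_alt y0 y1 labels none
        = chunkLoop (max 1 (y1 - y0 + 1)).toNat (labels.filter (fun _ => true)) 0 [] := rfl
    rw [e1, e2, loopA_eq_wrap y0 y1 labels [] 0 y0, List.nil_append, List.filter_true,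
      chunkLoop_eq_chunkMaxes _ hc1, List.nil_append,
      (wrap_eq_chunk y0 y1 _ hc labels).1]
  | some d =>
    have e1 : column_sizer y0 y1 labels (some d)
        = finishA (labels.foldl
            (fun st name => if (!((PySem.Dict.mk d).contains name)) then st else stepA y0 y1 st name)
            ([], 0, y0)) := rfl
    have e2 : column_sizer_alt y0 y1 labels (some d)
        = chunkLoop (max 1 (y1 - y0 + 1)).toNat
            (labels.filter (fun name => (PySem.Dict.mk d).contains name)) 0 [] := rfl
    have hguard : ∀ (st : List Int × Int × Int), ∀ name ∈ labels,
        (if (!((PySem.Dict.mk d).contains name)) then st else stepA y0 y1 st name)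
        = (if ((PySem.Dict.mk d).contains name) then stepA y0 y1 st name else st) := by
      intro st name _
      cases h : (PySem.Dict.mk d).contains name <;> simp
    rw [e1, e2,
      PySem.List.foldl_congr_mem labels _
        (fun st name => if ((PySem.Dict.mk d).contains name) then stepA y0 y1 st name else st)
        ([], 0, y0) hguard,
      PySem.List.foldl_if_eq_foldl_filter (fun name => (PySem.Dict.mk d).contains name)
        (stepA y0 y1) labels ([], 0, y0),
      loopA_eq_wrap y0 y1 _ [] 0 y0, List.nil_append,
      chunkLoop_eq_chunkMaxes _ hc1, List.nil_append,
      (wrap_eq_chunk y0 y1 _ hc _).1]
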